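-- pv_equiv track=rewrite | github.com/danx0r/bufo | bufo.py | rebufo
-- ===== SOURCE A (Python) =====
-- vowels = "aeiouyEO"
--
-- consonants = "bcdfgjkmnprstvxz"
--
-- def rebufo_(b):
--     h = 0
--     b = b.replace("ee", "E").replace("oo", "O")
--     b = list(b)
--     b[0] = b[0].lower()
--     b.reverse()
--     for c in b:
--         if c in vowels:
--             h <<= 3
--             h += vowels.find(c)
--         elif c in consonants:
--             h <<= 4
--             h += consonants.find(c)
--         else:
--             return "That doesn't look like anything to me"
--     return h
--
-- def rebufo(b):
--     h = 0
--     x = b.split()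
--     x.reverse()
--     for w in x:
--         h <<= 14
--         h += rebufo_(w)
--     return h
-- ===== SOURCE B (Python) =====
-- vowels = "aeiouyEO"
-- consonants = "bcdfgjkmnprstvxz"
--
-- def _enc(w):
--     w = w.replace("ee", "E").replace("oo", "O")
--     w = w[0].lower() + w[1:]
--     h = 0
--     off = 0
--     for c in w:
--         i = vowels.find(c)
--         if i >= 0:
--             h += i << off
--             off += 3
--             continue
--         i = consonants.find(c)
--         if i >= 0:
--             h += i << off
--             off += 4
--             continue
--         return "That doesn't look like anything to me"
--     return h
--
-- def rebufo(b):
--     h = 0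
--     off = 0
--     for w in b.split():
--         h += _enc(w) << off
--         off += 14
--     return h
-- ===== Notes on version B (the rewrite author's own statement) =====
-- stated objective: alternative
-- what changed: B replaces A's list(b)-mutate-reverse-then-shift-accumulate encoding (both per character and per word) with a single forward scan that adds each code at a running bit offset (vowel: 3 bits, consonant: 4 bits, word: 14 bits), building the identical LSB-first integer without any reversal or list mutation.
import Mathlib
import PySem

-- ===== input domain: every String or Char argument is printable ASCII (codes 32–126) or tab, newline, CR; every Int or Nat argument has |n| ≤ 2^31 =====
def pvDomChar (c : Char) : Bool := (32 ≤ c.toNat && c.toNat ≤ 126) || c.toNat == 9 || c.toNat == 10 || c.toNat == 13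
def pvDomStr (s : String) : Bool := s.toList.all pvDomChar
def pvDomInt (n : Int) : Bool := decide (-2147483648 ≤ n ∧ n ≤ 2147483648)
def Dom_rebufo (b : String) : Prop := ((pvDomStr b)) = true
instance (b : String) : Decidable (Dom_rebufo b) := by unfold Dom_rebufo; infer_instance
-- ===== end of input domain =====

-- B packs the same LSB-first integer with a running bit offset (forward scan, no list reversal / in-place mutation); objective: alternative decomposition.

-- ===== PORT A =====
def pvVowels : List Char := ['a','e','i','o','u','y','E','O']
def pvCons : List Char := ['b','c','d','f','g','j','k','m','n','p','r','s','t','v','x','z']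

-- shared preprocessing: w.replace("ee","E").replace("oo","O"), then the first char lowered
-- (Python's b[0] raises IndexError on ""; unreachable from rebufo since split() yields nonempty words)
def pvPrep (w : List Char) : List Char :=
  match PySem.Chars.replace (PySem.Chars.replace w ['e','e'] ['E']) ['o','o'] ['O'] with
  | [] => []
  | c :: cs => PySem.Chars.lowerChar c :: cs

-- one step of A's char loop; 'c in vowels' / 'vowels.find(c)' on a 1-char needle = list membership / index.
-- none = the sentinel string was returned (the caller's 'h += <str>' then raises TypeError, excluded by Pre_)
def pvStepA (h : Option Int) (c : Char) : Option Int :=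
  match h with
  | none => none
  | some h =>
    if c ∈ pvVowels then some ((h <<< (3:Nat)) + (pvVowels.idxOf c : Int))
    else if c ∈ pvCons then some ((h <<< (4:Nat)) + (pvCons.idxOf c : Int))
    else none

-- rebufo_ : preprocess, reverse, shift-and-add
def pvRebufoAux (w : List Char) : Option Int :=
  ((pvPrep w).reverse).foldl pvStepA (some 0)

-- 'h <<= 14; h += rebufo_(w)' (none = rebufo_ returned the sentinel: Python raises TypeError, outside Pre_)
def pvStepWordA (h : Option Int) (w : String) : Option Int :=
  match h, pvRebufoAux w.toList with
  | some h, some v => some ((h <<< (14:Nat)) + v)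
  | _, _ => none

def rebufo (b : String) : Int :=
  (((PySem.Str.split₀ b).reverse).foldl pvStepWordA (some 0)).getD 0   -- none (a bad character: Python raises TypeError) is outside Pre_

-- ===== PORT B =====
-- forward scan with a running bit offset instead of reverse-then-shift
def pvEncChars : List Char → Nat → Int → Option Int
  | [], _, acc => some acc
  | c :: cs, off, acc =>
    match PySem.List.index? pvVowels c with
    | some i => pvEncChars cs (off + 3) (acc + (i : Int) <<< off)
    | none =>
      match PySem.List.index? pvCons c with
      | some i => pvEncChars cs (off + 4) (acc + (i : Int) <<< off)
      | none => none   -- the sentinel string: caller's '<str> << off' raises TypeError, outside Pre_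

def pvEncWord (w : List Char) : Option Int := pvEncChars (pvPrep w) 0 0

def pvPackWords : List (List Char) → Nat → Int → Option Int
  | [], _, acc => some acc
  | w :: ws, off, acc =>
    match pvEncWord w with
    | some v => pvPackWords ws (off + 14) (acc + v <<< off)
    | none => none

def rebufo_alt (b : String) : Int :=
  (pvPackWords ((PySem.Str.split₀ b).map String.toList) 0 0).getD 0

-- ===== PRECONDITION & SPEC =====
-- Pre_ excludes exactly the inputs where some preprocessed character of some word is neither a vowel
-- nor a consonant: there Python A returns the sentinel string and raises TypeError in rebufo's 'h += …'.
def Pre_rebufo (b : String) : Prop :=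
  ((PySem.Str.split₀ b).all
    (fun w => (pvPrep w.toList).all (fun c => decide (c ∈ pvVowels ++ pvCons)))) = true
instance (b : String) : Decidable (Pre_rebufo b) := by unfold Pre_rebufo; infer_instance
def pvWitness_rebufo : String := "bufo sez"

def Spec_rebufo (b : String) (out : Int) : Prop := out = rebufo_alt b
instance (b : String) (out : Int) : Decidable (Spec_rebufo b out) := by unfold Spec_rebufo; infer_instance

-- ===== CLAIM (what is proved, stated in full; the proofs are below) =====
def Claim_equal_rebufo : Prop := ∀ (b : String), Dom_rebufo b → Pre_rebufo b → Spec_rebufo b (rebufo b)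

-- ===== LEMMAS AND PROOFS =====

theorem idxOf?_of_mem (l : List Char) (c : Char) (h : c ∈ l) :
    List.idxOf? c l = some (l.idxOf c) := by
  induction l with
  | nil => simp at h
  | cons a l ih =>
    by_cases hac : a = c
    · simp [List.idxOf?, List.idxOf, hac, List.findIdx?_cons, List.findIdx_cons]
    · have hm : c ∈ l := by cases h with | head => exact absurd rfl hac | tail _ h => exact h
      simp [List.idxOf?_cons, hac, ih hm, beq_iff_eq]

theorem idxOf?_of_not_mem (l : List Char) (c : Char) (h : c ∉ l) :
    List.idxOf? c l = none := by
  rw [← PySem.List.index?_eq_idxOf?]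
  simp [h]

-- A's reversed foldl over the characters as a structural (front-first) recursion
def pvEncA (cs : List Char) : Option Int := cs.foldr (fun c h => pvStepA h c) (some 0)

theorem pvRebufoAux_eq (w : List Char) : pvRebufoAux w = pvEncA (pvPrep w) := by
  simp [pvRebufoAux, pvEncA, List.foldl_reverse]

-- B's forward offset scan computes A's reverse-and-shift value, shifted into position
theorem pvEncChars_eq (cs : List Char) :
    ∀ (off : Nat) (acc : Int),
      pvEncChars cs off acc = (pvEncA cs).map (fun (v : Int) => acc + v <<< off) := by
  induction cs with
  | nil => intro off acc; simp [pvEncChars, pvEncA]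
  | cons c cs ih =>
    intro off acc
    have hstep : pvEncA (c :: cs) = pvStepA (pvEncA cs) c := rfl
    rw [hstep]
    by_cases hv : c ∈ pvVowels
    · rw [show pvEncChars (c :: cs) off acc
            = pvEncChars cs (off + 3) (acc + ((pvVowels.idxOf c : Nat) : Int) <<< off) from by
          simp [pvEncChars, idxOf?_of_mem _ _ hv]]
      rw [ih]
      cases hE : pvEncA cs with
      | none => simp [pvStepA]
      | some t => simp [pvStepA, hv, Int.shiftLeft_eq]; ring
    · by_cases hk : c ∈ pvCons
      · rw [show pvEncChars (c :: cs) off acc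
              = pvEncChars cs (off + 4) (acc + ((pvCons.idxOf c : Nat) : Int) <<< off) from by
            simp [pvEncChars, idxOf?_of_not_mem _ _ hv, idxOf?_of_mem _ _ hk]]
        rw [ih]
        cases hE : pvEncA cs with
        | none => simp [pvStepA]
        | some t => simp [pvStepA, hv, hk, Int.shiftLeft_eq]; ring
      · rw [show pvEncChars (c :: cs) off acc = none from by
            simp [pvEncChars, idxOf?_of_not_mem _ _ hv, idxOf?_of_not_mem _ _ hk]]
        cases pvEncA cs <;> simp [pvStepA, hv, hk]

theorem pvEncWord_eq (w : List Char) : pvEncWord w = pvRebufoAux w := by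
  rw [pvRebufoAux_eq, pvEncWord, pvEncChars_eq]
  cases pvEncA (pvPrep w) <;> simp [Int.shiftLeft_eq]

-- B's word loop computes A's reversed word fold, shifted into position
theorem pvPackWords_eq (ws : List String) :
    ∀ (off : Nat) (acc : Int),
      pvPackWords (ws.map String.toList) off acc =
        ((ws.reverse).foldl pvStepWordA (some 0)).map (fun (v : Int) => acc + v <<< off) := by
  induction ws with
  | nil => intro off acc; simp [pvPackWords]
  | cons w ws ih =>
    intro off acc
    simp only [List.reverse_cons, List.foldl_append, List.foldl_cons, List.foldl_nil,
      List.map_cons]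
    rw [show pvPackWords (w.toList :: ws.map String.toList) off acc
          = match pvEncWord w.toList with
            | some v => pvPackWords (ws.map String.toList) (off + 14) (acc + v <<< off)
            | none => none from rfl]
    rw [pvEncWord_eq]
    cases hA : pvRebufoAux w.toList with
    | none =>
      cases (ws.reverse).foldl pvStepWordA (some 0) <;> simp [pvStepWordA, hA]
    | some v =>
      have hm : (match some v with
            | some v => pvPackWords (ws.map String.toList) (off + 14) (acc + v <<< off)
            | none => none) = pvPackWords (ws.map String.toList) (off + 14) (acc + v <<< off) := rfl
      rw [hm, ih]
      cases hF : (ws.reverse).foldl pvStepWordA (some 0) with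
      | none => simp [pvStepWordA, hA]
      | some t => simp [pvStepWordA, hA, Int.shiftLeft_eq]; ring

-- ===== VERDICT (by name: the statement is the Claim_ definition above) =====
theorem rebufo_spec : Claim_equal_rebufo := by
  intro b _ _
  unfold Spec_rebufo rebufo rebufo_alt
  rw [pvPackWords_eq]
  cases ((PySem.Str.split₀ b).reverse).foldl pvStepWordA (some 0) <;>
    simp [Int.shiftLeft_eq]
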